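-- pv_equiv track=rewrite | github.com/ynztyl10/pylt | trunk/results.py | calc_throughputs
-- ===== SOURCE A (Python) =====
-- def calc_throughputs(epochs):
--     # load up a dictionary with epochs as keys and counts as values
--     # need start and end times
--     start_sec = epochs[0]
--     end_sec = epochs[-1]
--     throughputs = {}
--     for epoch in range(start_sec, end_sec + 1):
--         count = epochs.count(epoch)
--         throughputs[epoch - start_sec] = count
--     return throughputs
-- ===== SOURCE B (Python) =====
-- def calc_throughputs(epochs):
--     # zero-init the dict over the whole range, then one counting pass over epochs
--     start = epochs[0]
--     end = epochs[-1]
--     throughputs = {i: 0 for i in range(end - start + 1)}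
--     for e in epochs:
--         if start <= e <= end:
--             throughputs[e - start] += 1
--     return throughputs
-- ===== Notes on version B (the rewrite author's own statement) =====
-- stated objective: faster
-- what changed: Replaces the per-second epochs.count scan (O(range*n)) by a zero-initialised dict over the range plus one counting pass over epochs.
import Mathlib
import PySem

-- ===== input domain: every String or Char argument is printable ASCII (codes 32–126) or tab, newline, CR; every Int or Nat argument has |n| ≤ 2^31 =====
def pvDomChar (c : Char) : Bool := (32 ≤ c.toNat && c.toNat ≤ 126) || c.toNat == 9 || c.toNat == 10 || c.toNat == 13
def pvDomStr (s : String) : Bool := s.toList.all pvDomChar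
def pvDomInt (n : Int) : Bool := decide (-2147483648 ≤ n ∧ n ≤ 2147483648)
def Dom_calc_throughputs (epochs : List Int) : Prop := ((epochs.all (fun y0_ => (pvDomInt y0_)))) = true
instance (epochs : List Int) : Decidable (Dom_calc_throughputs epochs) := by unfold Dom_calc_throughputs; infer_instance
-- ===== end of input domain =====

-- B replaces A's per-second epochs.count scan by a zero-initialised dict over the range
-- plus a single counting pass over epochs (objective: faster, asymptotic).

-- ===== PORT A =====
def calc_throughputs (epochs : List Int) : List (Int × Int) :=
  match PySem.List.pyGet? epochs 0, PySem.List.pyGet? epochs (-1) with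
  | some start_sec, some end_sec =>
      ((PySem.List.pyRange start_sec (end_sec + 1) 1).foldl
        (fun d epoch => d.insert (epoch - start_sec) ((PySem.List.count epochs epoch : Nat) : Int))
        PySem.Dict.empty).items
  | _, _ => []

-- ===== PORT B =====
def calc_throughputs_alt (epochs : List Int) : List (Int × Int) :=
  match PySem.List.pyGet? epochs 0 with
  | none => []
  | some start =>
    match PySem.List.pyGet? epochs (-1) with
    | none => []
    | some fin =>
      let d0 := (PySem.List.pyRange 0 (fin - start + 1) 1).foldl
        (fun d i => d.insert i (0 : Int)) PySem.Dict.empty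
      (epochs.foldl
        (fun d e => if start ≤ e ∧ e ≤ fin then d.modify (e - start) 0 (· + 1) else d)
        d0).items

-- ===== PRECONDITION & SPEC =====
-- Pre_ excludes only the empty list, on which Python A raises IndexError (epochs[0]).
def Pre_calc_throughputs (epochs : List Int) : Prop := epochs ≠ []
instance (epochs : List Int) : Decidable (Pre_calc_throughputs epochs) := by unfold Pre_calc_throughputs; infer_instance
def pvWitness_calc_throughputs : List Int := [3, 5, 3, 5]

def Spec_calc_throughputs (epochs : List Int) (out : List (Int × Int)) : Prop := out = calc_throughputs_alt epochs
instance (epochs : List Int) (out : List (Int × Int)) : Decidable (Spec_calc_throughputs epochs out) := by unfold Spec_calc_throughputs; infer_instance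

-- ===== CLAIM (what is proved, stated in full; the proofs are below) =====
def Claim_equal_calc_throughputs : Prop := ∀ (epochs : List Int), Dom_calc_throughputs epochs → Pre_calc_throughputs epochs → Spec_calc_throughputs epochs (calc_throughputs epochs)

-- ===== LEMMAS AND PROOFS =====
lemma pyRange_one_eq (a b : Int) :
    PySem.List.pyRange a b 1 = (List.range (b - a).toNat).map (fun k : Nat => a + (k : Int)) := by
  unfold PySem.List.pyRange
  by_cases h : a < b
  · simp only [if_neg (one_ne_zero), if_pos (by norm_num : (0:Int) < 1), if_pos h]
    have h1 : (b - a + 1 - 1) / 1 = b - a := by omega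
    rw [h1]
    exact List.map_congr_left (fun k _ => by omega)
  · simp only [if_neg (one_ne_zero), if_pos (by norm_num : (0:Int) < 1), if_neg h]
    have h1 : (b - a).toNat = 0 := by omega
    simp [h1]

lemma getD_foldl_modify_sub (l : List Int) (s : Int) (d : PySem.Dict Int Int) (v : Int) :
    (l.foldl (fun d e => d.modify (e - s) 0 (· + 1)) d).getD v 0
      = d.getD v 0 + (l.map (fun e => e - s)).count v := by
  induction l generalizing d with
  | nil => simp
  | cons x t ih =>
    simp only [List.foldl_cons, List.map_cons, ih, PySem.Dict.getD_modify]
    by_cases h : v = x - s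
    · subst h
      simp
      omega
    · simp [h, Ne.symm h]

lemma main_eq (start fin : Int) (epochs : List Int) :
    ((PySem.List.pyRange start (fin + 1) 1).foldl
        (fun d epoch => d.insert (epoch - start) ((PySem.List.count epochs epoch : Nat) : Int))
        PySem.Dict.empty).items
    = ((epochs.foldl
        (fun d e => if start ≤ e ∧ e ≤ fin then d.modify (e - start) 0 (· + 1) else d)
        ((PySem.List.pyRange 0 (fin - start + 1) 1).foldl
          (fun d i => d.insert i (0 : Int)) PySem.Dict.empty)).items) := by
  have hcast : Function.Injective (fun k : Nat => (k : Int)) := fun a b h => by simpa using h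
  set N := (fin - start + 1).toNat with hN
  have hN' : (fin + 1 - start).toNat = N := by omega
  -- ===== A side =====
  rw [pyRange_one_eq start (fin + 1), hN']
  have hA := PySem.Dict.items_foldl_insert_fresh
      ((List.range N).map (fun k : Nat => start + (k : Int)))
      (fun e => e - start) (fun e => ((PySem.List.count epochs e : Nat) : Int))
      PySem.Dict.empty
      (by intro a _; simp)
      (by
        rw [List.map_map]
        have : ((fun e => e - start) ∘ fun k : Nat => start + (k : Int)) = (fun k : Nat => (k : Int)) := by
          funext k; simp
        rw [this]
        exact List.nodup_range.map hcast)
  rw [hA, List.map_map]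
  -- ===== B side: initial dict =====
  rw [pyRange_one_eq 0 (fin - start + 1)]
  have hN0 : (fin - start + 1 - 0).toNat = N := by omega
  rw [hN0]
  have hzero : (List.range N).map (fun k : Nat => (0 : Int) + (k : Int))
      = (List.range N).map (fun k : Nat => (k : Int)) :=
    List.map_congr_left (fun k _ => by omega)
  rw [hzero]
  set d0 := ((List.range N).map (fun k : Nat => (k : Int))).foldl
      (fun d i => d.insert i (0 : Int)) PySem.Dict.empty with hd0
  have hd0items : d0.items = (List.range N).map (fun k : Nat => ((k : Int), (0 : Int))) := by
    rw [hd0]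
    have := PySem.Dict.items_foldl_insert_fresh
        ((List.range N).map (fun k : Nat => (k : Int)))
        (fun i => i) (fun _ => (0 : Int)) PySem.Dict.empty
        (by intro a _; simp)
        (by simpa using List.nodup_range.map hcast)
    simpa [List.map_map] using this
  have hd0keys : d0.keys = (List.range N).map (fun k : Nat => (k : Int)) := by
    simp [PySem.Dict.keys, hd0items, List.map_map]
  have hd0nodup : d0.keys.Nodup := by
    rw [hd0keys]; exact List.nodup_range.map hcast
  -- ===== B side: counting loop → filtered fold =====
  have hfun : (fun (d : PySem.Dict Int Int) (e : Int) =>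
        if start ≤ e ∧ e ≤ fin then d.modify (e - start) 0 (· + 1) else d)
      = (fun d e => if (decide (start ≤ e ∧ e ≤ fin)) = true then d.modify (e - start) 0 (· + 1) else d) := by
    funext d e; by_cases h : start ≤ e ∧ e ≤ fin <;> simp [h]
  rw [hfun, ← List.foldl_filter]
  set F := epochs.filter (fun e => decide (start ≤ e ∧ e ≤ fin)) with hF
  have hFmem : ∀ e ∈ F, start ≤ e ∧ e ≤ fin := by
    intro e he
    rw [hF] at he
    have := List.of_mem_filter he
    simpa using this
  set dfin := F.foldl (fun d e => d.modify (e - start) 0 (· + 1)) d0 with hdfin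
  have hkeys : dfin.keys = d0.keys := by
    rw [hdfin, PySem.Dict.keys_foldl_modify_key F (fun e => e - start) 0 (fun _ _ => (· + 1)) d0]
    rw [PySem.Set.update_eq_append_filter]
    have : (PySem.Set.ofList (F.map (fun e => e - start))).filter
        (fun y => !(PySem.Set.contains d0.keys y)) = [] := by
      rw [List.filter_eq_nil_iff]
      intro y hy
      have hy' : y ∈ F.map (fun e => e - start) := (PySem.Set.mem_ofList _ _).mp hy
      obtain ⟨e, heF, rfl⟩ := List.mem_map.mp hy'
      obtain ⟨h1, h2⟩ := hFmem e heF
      have : e - start ∈ d0.keys := by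
        rw [hd0keys, List.mem_map]
        exact ⟨(e - start).toNat, List.mem_range.mpr (by omega), by omega⟩
      simp only [PySem.Set.contains_eq_listContains, List.contains_eq_mem, this]
      simp
    rw [this, List.append_nil]
  have hnodupfin : dfin.keys.Nodup := hkeys ▸ hd0nodup
  rw [PySem.Dict.items_eq_map_keys dfin hnodupfin 0, hkeys, hd0keys, List.map_map]
  -- ===== pointwise =====
  apply List.map_congr_left
  intro j hj
  have hjN : j < N := List.mem_range.mp hj
  simp only [Function.comp]
  refine Prod.ext (by simp) ?_
  show ((PySem.List.count epochs (start + (j : Int)) : Nat) : Int) = dfin.getD (j : Int) 0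
  rw [hdfin, getD_foldl_modify_sub]
  have hget0 : d0.getD ((j : Int)) 0 = 0 :=
    PySem.Dict.getD_of_mem_items d0
      (by rw [hd0items]; exact List.mem_map.mpr ⟨j, hj, rfl⟩) hd0nodup 0
  rw [hget0]
  have hinj : Function.Injective (fun e : Int => e - start) := fun a b h => by simpa using h
  have hjN' : (j : Int) < fin - start + 1 := by
    rw [hN] at hjN; omega
  have hcnt : (F.map (fun e => e - start)).count ((j : Int))
      = List.count (start + (j : Int)) epochs := by
    have h2 := List.count_map_of_injective F (fun e : Int => e - start) hinj (start + (j : Int))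
    have h3 : start + (j : Int) - start = (j : Int) := by omega
    rw [h3] at h2
    rw [h2, hF]
    apply List.count_filter
    simp only [decide_eq_true_eq]
    omega
  rw [hcnt, PySem.List.count_eq]
  omega

-- ===== VERDICT (by name: the statement is the Claim_ definition above) =====
theorem calc_throughputs_spec : Claim_equal_calc_throughputs := by
  intro epochs _ _
  unfold Spec_calc_throughputs calc_throughputs calc_throughputs_alt
  cases h0 : PySem.List.pyGet? epochs 0 with
  | none => cases h1 : PySem.List.pyGet? epochs (-1) <;> rfl
  | some s =>
    cases h1 : PySem.List.pyGet? epochs (-1) with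
    | none => rfl
    | some f => exact main_eq s f epochs
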